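-- pv_equiv track=rewrite | github.com/kiptuidenis/mercor-bot | src/bot.py | optimize_description
-- ===== SOURCE A (Python) =====
-- def optimize_description(text: str) -> str:
--     """
--     Condense description to save tokens.
--     Priority: "Requirements/Qualifications" section.
--     Fallback: First 3000 chars.
--     """
--     if not text:
--         return ""
--
--     # Text is often Markdown from JSON-LD or raw text
--     # Look for headers
--     headers = [
--         "Requirements", "Qualifications", "What you bring", "Who you are",
--         "Ideal Candidate", "Skills", "Prerequisites"
--     ]
--
--     # Try to find a header
--     best_start = -1
--     for header in headers:
--         # Check for markdown header (**Header**) or plain text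
--         idx = text.find(header)
--         if idx != -1:
--             if best_start == -1 or idx < best_start:
--                 best_start = idx
--
--     if best_start != -1:
--         # Found a relevant section!
--         # Take from that section onwards, up to 3000 chars
--         # Often valid info is 500 chars before (Role overview) + the requirements
--         start_safe = max(0, best_start - 500)
--         optimized = text[start_safe:]
--     else:
--         # No header found, take the top (usually summary + bullets)
--         optimized = text
--
--     # Hard limit to 3000 chars (~750 tokens)
--     if len(optimized) > 3000:
--         optimized = optimized[:3000] + "\n...[TRUNCATED]..."
--
--     return optimized
-- ===== SOURCE B (Python) =====
-- def optimize_description(text: str) -> str: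
--     """
--     Condense description to save tokens.
--     Priority: "Requirements/Qualifications" section.
--     Fallback: First 3000 chars.
--     """
--     if not text:
--         return ""
--
--     headers = ("Requirements", "Qualifications", "What you bring", "Who you are",
--                "Ideal Candidate", "Skills", "Prerequisites")
--
--     # Single left-to-right scan: first position at which any header starts.
--     best_start = next((i for i in range(len(text))
--                        if text.startswith(headers, i)), -1)
--
--     optimized = text[max(0, best_start - 500):] if best_start != -1 else text
--
--     if len(optimized) > 3000:
--         optimized = optimized[:3000] + "\n...[TRUNCATED]..."
--
--     return optimized
-- ===== Notes on version B (the rewrite author's own statement) =====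
-- stated objective: idiomatic
-- what changed: Replaced the per-header find()-and-keep-minimum loop with a single left-to-right scan for the first position at which any header starts (str.startswith with a tuple of headers), keeping the identical 500-char lookback and 3000-char truncation.
import Mathlib
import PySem

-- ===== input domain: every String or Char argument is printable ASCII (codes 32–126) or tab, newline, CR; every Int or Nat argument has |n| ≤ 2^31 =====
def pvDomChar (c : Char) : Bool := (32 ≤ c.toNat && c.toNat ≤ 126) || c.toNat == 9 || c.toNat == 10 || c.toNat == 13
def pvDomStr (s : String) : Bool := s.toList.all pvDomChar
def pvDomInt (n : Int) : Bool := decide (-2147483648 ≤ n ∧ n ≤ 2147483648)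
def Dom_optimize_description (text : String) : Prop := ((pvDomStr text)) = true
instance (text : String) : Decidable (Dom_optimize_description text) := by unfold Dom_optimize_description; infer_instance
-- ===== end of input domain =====

-- B replaces A's per-header find()-and-keep-minimum loop by a single left-to-right scan for
-- the first position at which any header starts (idiomatic; same asymptotic cost).

def pvHeaders : List (List Char) :=
  ["Requirements".toList, "Qualifications".toList, "What you bring".toList,
   "Who you are".toList, "Ideal Candidate".toList, "Skills".toList, "Prerequisites".toList]

def pvTrunc : List Char := "\n...[TRUNCATED]...".toList

-- ===== PORT A =====
-- best_start loop: for header in headers: idx = text.find(header); if idx != -1: if best == -1 or idx < best: best = idx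
def pvBestA (t : List Char) : Int :=
  pvHeaders.foldl
    (fun best h =>
      if PySem.Chars.find t h ≠ -1 then
        if best = -1 ∨ PySem.Chars.find t h < best then PySem.Chars.find t h else best
      else best)
    (-1)

def pvGoA (t : List Char) : List Char :=
  if t = [] then []
  else
    let best := pvBestA t
    let optimized :=
      if best ≠ -1 then PySem.Chars.slice t (some (max 0 (best - 500))) none else t
    if PySem.Chars.len optimized > 3000 then
      PySem.Chars.slice optimized none (some 3000) ++ pvTrunc
    else optimized

def optimize_description (text : String) : String := String.ofList (pvGoA text.toList)

-- ===== PORT B =====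
-- next((i for i in range(len(text)) if text.startswith(headers, i)), -1), as a scan over suffixes
def pvScanB : List Char → Int
  | [] => -1
  | c :: rest =>
    if pvHeaders.any (fun h => PySem.Chars.startswith (c :: rest) h) then 0
    else
      let r := pvScanB rest
      if r = -1 then -1 else r + 1

def pvGoB (t : List Char) : List Char :=
  if t = [] then []
  else
    let i := pvScanB t
    let optimized := if i ≠ -1 then t.drop (i - 500).toNat else t
    if optimized.length > 3000 then optimized.take 3000 ++ pvTrunc else optimized

def optimize_description_alt (text : String) : String := String.ofList (pvGoB text.toList)

-- ===== PRECONDITION & SPEC =====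
def Spec_optimize_description (text : String) (out : String) : Prop := out = optimize_description_alt text
instance (text : String) (out : String) : Decidable (Spec_optimize_description text out) := by unfold Spec_optimize_description; infer_instance

-- ===== CLAIM (what is proved, stated in full; the proofs are below) =====
def Claim_equal_optimize_description : Prop := ∀ (text : String), Dom_optimize_description text → Spec_optimize_description text (optimize_description text)

-- ===== LEMMAS AND PROOFS =====

-- "some header is a prefix of the suffix of t starting at j"
def pvP (t : List Char) (j : Nat) : Prop := ∃ h ∈ pvHeaders, h <+: t.drop j

-- the common characterisation: r = -1 and no header occurs, or r is the least match position
def pvLeast (t : List Char) (r : Int) : Prop :=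
  (r = -1 ∧ ∀ j, ¬ pvP t j) ∨
  (0 ≤ r ∧ pvP t r.toNat ∧ ∀ j < r.toNat, ¬ pvP t j)

theorem pvHeaders_ne_nil : ∀ h ∈ pvHeaders, h ≠ [] := by decide

theorem pvP_succ (c : Char) (rest : List Char) (j : Nat) :
    pvP (c :: rest) (j + 1) ↔ pvP rest j := by
  simp [pvP]

theorem pvScanB_least (t : List Char) : pvLeast t (pvScanB t) := by
  induction t with
  | nil =>
    left
    refine ⟨rfl, ?_⟩
    rintro j ⟨h, hm, hp⟩
    have : h = [] := List.prefix_nil.mp (by simpa using hp)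
    exact pvHeaders_ne_nil h hm this
  | cons c rest ih =>
    by_cases hAny : pvHeaders.any (fun h => PySem.Chars.startswith (c :: rest) h) = true
    · right
      have hscan : pvScanB (c :: rest) = 0 := by simp [pvScanB, hAny]
      rw [hscan]
      refine ⟨le_refl _, ?_, ?_⟩
      · obtain ⟨h, hm, hsw⟩ := List.any_eq_true.mp hAny
        exact ⟨h, hm, by simpa using (PySem.Chars.startswith_iff _ _).mp hsw⟩
      · intro j hj; omega
    · have hAny' : pvHeaders.any (fun h => PySem.Chars.startswith (c :: rest) h) = false :=
        Bool.eq_false_iff.mpr hAny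
      have hP0 : ¬ pvP (c :: rest) 0 := by
        rintro ⟨h, hm, hp⟩
        have := List.any_eq_false.mp hAny' h hm
        exact absurd ((PySem.Chars.startswith_iff _ _).mpr (by simpa using hp)) (by simp [this])
      rcases ih with ⟨hr, hnone⟩ | ⟨hr0, hPr, hmin⟩
      · left
        refine ⟨by simp [pvScanB, hAny', hr], ?_⟩
        intro j
        cases j with
        | zero => exact hP0
        | succ k => exact fun h => hnone k ((pvP_succ c rest k).mp h)
      · right
        have hne : pvScanB rest ≠ -1 := by omega
        have hscan : pvScanB (c :: rest) = pvScanB rest + 1 := by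
          simp [pvScanB, hAny', hne]
        rw [hscan]
        have htn : (pvScanB rest + 1).toNat = (pvScanB rest).toNat + 1 := by omega
        refine ⟨by omega, ?_, ?_⟩
        · rw [htn, pvP_succ]; exact hPr
        · intro j hj
          rw [htn] at hj
          cases j with
          | zero => exact hP0
          | succ k => exact fun h => hmin k (by omega) ((pvP_succ c rest k).mp h)

-- invariant for A's fold over the header list
def pvInvA (t : List Char) (hs : List (List Char)) (b : Int) : Prop :=
  (b = -1 ∧ ∀ h ∈ hs, PySem.Chars.find t h = -1) ∨
  (0 ≤ b ∧ (∃ h ∈ hs, PySem.Chars.find t h = b) ∧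
    ∀ h ∈ hs, PySem.Chars.find t h = -1 ∨ b ≤ PySem.Chars.find t h)

theorem pvInvA_step (t : List Char) (hs : List (List Char)) (b : Int) (h : List Char)
    (hinv : pvInvA t hs b) :
    pvInvA t (hs ++ [h])
      (if PySem.Chars.find t h ≠ -1 then
        if b = -1 ∨ PySem.Chars.find t h < b then PySem.Chars.find t h else b
      else b) := by
  have hge : -1 ≤ PySem.Chars.find t h := PySem.Chars.neg_one_le_find t h
  by_cases hidx : PySem.Chars.find t h = -1
  · simp only [hidx, ne_eq, not_true_eq_false, if_false]
    rcases hinv with ⟨hb, hall⟩ | ⟨hb, hex, hall⟩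
    · left; refine ⟨hb, ?_⟩
      intro h' hh'
      rcases List.mem_append.mp hh' with hh | hh
      · exact hall h' hh
      · simp at hh; subst hh; exact hidx
    · right
      refine ⟨hb, ?_, ?_⟩
      · obtain ⟨h0, hm, he⟩ := hex; exact ⟨h0, List.mem_append_left _ hm, he⟩
      · intro h' hh'
        rcases List.mem_append.mp hh' with hh | hh
        · exact hall h' hh
        · simp at hh; subst hh; exact Or.inl hidx
  · have hpos : 0 ≤ PySem.Chars.find t h := by omega
    simp only [hidx, ne_eq, not_false_eq_true, if_true]
    rcases hinv with ⟨hb, hall⟩ | ⟨hb, hex, hall⟩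
    · have : b = -1 ∨ PySem.Chars.find t h < b := Or.inl hb
      simp only [this, if_true]
      right
      refine ⟨hpos, ⟨h, List.mem_append_right _ (by simp), rfl⟩, ?_⟩
      intro h' hh'
      rcases List.mem_append.mp hh' with hh | hh
      · exact Or.inl (hall h' hh)
      · simp at hh; subst hh; exact Or.inr (le_refl _)
    · by_cases hlt : PySem.Chars.find t h < b
      · simp only [Or.inr hlt, if_true]
        right
        refine ⟨hpos, ⟨h, List.mem_append_right _ (by simp), rfl⟩, ?_⟩
        intro h' hh'
        rcases List.mem_append.mp hh' with hh | hh
        · rcases hall h' hh with h1 | h1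
          · exact Or.inl h1
          · exact Or.inr (by omega)
        · simp at hh; subst hh; exact Or.inr (le_refl _)
      · have hcond : ¬ (b = -1 ∨ PySem.Chars.find t h < b) := by omega
        simp only [hcond, if_false]
        right
        refine ⟨hb, ?_, ?_⟩
        · obtain ⟨h0, hm, he⟩ := hex; exact ⟨h0, List.mem_append_left _ hm, he⟩
        intro h' hh'
        rcases List.mem_append.mp hh' with hh | hh
        · exact hall h' hh
        · simp at hh; subst hh; exact Or.inr (by omega)

theorem pvInvA_foldl (t : List Char) (hs : List (List Char)) :
    ∀ (hs0 : List (List Char)) (b : Int), pvInvA t hs0 b →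
      pvInvA t (hs0 ++ hs)
        (hs.foldl
          (fun best h =>
            if PySem.Chars.find t h ≠ -1 then
              if best = -1 ∨ PySem.Chars.find t h < best then PySem.Chars.find t h else best
            else best) b) := by
  induction hs with
  | nil => intro hs0 b hinv; simpa using hinv
  | cons h rest ih =>
    intro hs0 b hinv
    have := ih (hs0 ++ [h]) _ (pvInvA_step t hs0 b h hinv)
    simpa [List.append_assoc] using this
theorem pvBestA_inv (t : List Char) : pvInvA t pvHeaders (pvBestA t) := by
  have := pvInvA_foldl t pvHeaders [] (-1) (Or.inl ⟨rfl, by simp⟩)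
  simpa [pvBestA] using this

theorem pvInfix_of_pvP (t : List Char) (j : Nat) (h : List Char) (hp : h <+: t.drop j) :
    h <:+: t :=
  (PySem.Chars.isIn_iff_infix h t).mp
    ((PySem.Chars.exists_prefix_drop_iff_isIn h t).mp ⟨j, hp⟩)

theorem pvBestA_least (t : List Char) : pvLeast t (pvBestA t) := by
  rcases pvBestA_inv t with ⟨hb, hall⟩ | ⟨hb, ⟨h0, hm0, hf0⟩, hall⟩
  · left
    refine ⟨hb, ?_⟩
    rintro j ⟨h, hm, hp⟩
    exact ((PySem.Chars.find_eq_neg_one_iff t h).mp (hall h hm)) (pvInfix_of_pvP t j h hp)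
  · right
    have hf0' : 0 ≤ PySem.Chars.find t h0 := by omega
    obtain ⟨hpre, _⟩ := PySem.Chars.find_spec hf0'
    refine ⟨hb, ⟨h0, hm0, by rwa [hf0] at hpre⟩, ?_⟩
    rintro j hj ⟨h, hm, hp⟩
    have hne : PySem.Chars.find t h ≠ -1 :=
      (PySem.Chars.find_ne_neg_one_iff t h).mpr (pvInfix_of_pvP t j h hp)
    have hle : pvBestA t ≤ PySem.Chars.find t h := by
      rcases hall h hm with h1 | h1
      · exact absurd h1 hne
      · exact h1
    have hfind : 0 ≤ PySem.Chars.find t h := by omega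
    obtain ⟨_, hmin⟩ := PySem.Chars.find_spec hfind
    exact hmin j (by omega) hp

theorem pvBestA_eq_pvScanB (t : List Char) : pvBestA t = pvScanB t := by
  rcases pvBestA_least t with ⟨ha, hna⟩ | ⟨ha, hPa, hMa⟩ <;>
    rcases pvScanB_least t with ⟨hs, hns⟩ | ⟨hs, hPs, hMs⟩
  · rw [ha, hs]
  · exact absurd hPs (hna _)
  · exact absurd hPa (hns _)
  · have h1 : ¬ (pvBestA t).toNat < (pvScanB t).toNat := fun h => hMs _ h hPa
    have h2 : ¬ (pvScanB t).toNat < (pvBestA t).toNat := fun h => hMa _ h hPs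
    omega

theorem pvGoA_eq_pvGoB (t : List Char) : pvGoA t = pvGoB t := by
  unfold pvGoA pvGoB
  rw [pvBestA_eq_pvScanB]
  by_cases ht : t = []
  · simp [ht]
  · simp only [ht, if_false]
    by_cases hr : pvScanB t = -1
    · simp only [hr, ne_eq, not_true_eq_false, if_false]
      by_cases hlen : t.length > 3000
      · have h1 : PySem.Chars.len t > 3000 := by rw [PySem.Chars.len_eq]; exact_mod_cast hlen
        simp only [h1, if_true, hlen]
        rw [PySem.Chars.slice_eq_listSlice, PySem.List.slice_to t (by norm_num : (0:Int) ≤ 3000)]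
        have h3 : (3000:Int).toNat = 3000 := rfl
        rw [h3]
      · simp [hlen]
    · have h0 : 0 ≤ pvScanB t := by
        rcases pvScanB_least t with ⟨h1, _⟩ | ⟨h1, _⟩
        · exact absurd h1 hr
        · exact h1
      simp only [hr, ne_eq, not_false_eq_true, if_true]
      have hmax : 0 ≤ max 0 (pvScanB t - 500) := le_max_left _ _
      have hdrop : PySem.Chars.slice t (some (max 0 (pvScanB t - 500))) none
          = t.drop (pvScanB t - 500).toNat := by
        rw [PySem.Chars.slice_eq_listSlice, PySem.List.slice_from t hmax]
        congr 1
        omega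
      rw [hdrop]
      set u := t.drop (pvScanB t - 500).toNat with hu
      by_cases hlen : u.length > 3000
      · have h1 : PySem.Chars.len u > 3000 := by rw [PySem.Chars.len_eq]; exact_mod_cast hlen
        simp only [h1, if_true, hlen]
        rw [PySem.Chars.slice_eq_listSlice, PySem.List.slice_to u (by norm_num : (0:Int) ≤ 3000)]
        have h3 : (3000:Int).toNat = 3000 := rfl
        rw [h3]
      · simp [hlen]

-- ===== VERDICT (by name: the statement is the Claim_ definition above) =====
theorem optimize_description_spec : Claim_equal_optimize_description := by
  intro text _
  unfold Spec_optimize_description optimize_description optimize_description_alt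
  rw [pvGoA_eq_pvGoB]
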